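-- pv_equiv track=rewrite | github.com/Talchain/Inference-Service-Layer | src/services/causal_representation_learner.py | _name_factor
-- ===== SOURCE A (Python) =====
-- from typing import Dict, List, Optional, Tuple
--
-- def _name_factor(
--
--     keywords: List[str],
--     domain_hints: Optional[List[str]] = None
-- ) -> str:
--     """
--     Generate a name for the factor based on keywords.
--
--     Uses heuristic matching with domain hints if available.
--     """
--     if not keywords:
--         return "unknown_factor"
--
--     # Try to find semantic themes
--     themes = {
--         "usability": ["confusing", "hard", "difficult", "find", "navigate", "understand", "unclear", "complex"],
--         "performance": ["slow", "freeze", "lag", "timeout", "crash", "hang", "loading", "speed"],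
--         "quality": ["bug", "error", "broken", "issue", "problem", "fail", "wrong", "defect"],
--         "support": ["help", "support", "question", "unclear", "documentation", "guide", "manual"],
--         "pricing": ["price", "cost", "expensive", "cheap", "value", "pricing", "subscription"],
--         "features": ["feature", "functionality", "capability", "missing", "add", "request", "want"],
--         "onboarding": ["setup", "start", "onboarding", "getting", "started", "initial", "first"],
--         "integration": ["integrate", "api", "connect", "sync", "export", "import", "plugin"]
--     }
--
--     # Score each theme
--     theme_scores = {}
--     for theme, theme_keywords in themes.items():
--         score = sum(1 for kw in keywords if kw in theme_keywords)
--         if score > 0: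
--             theme_scores[theme] = score
--
--     # Return best matching theme or construct from keywords
--     if theme_scores:
--         best_theme = max(theme_scores, key=theme_scores.get)
--         return f"{best_theme}_issues"
--     else:
--         # Construct name from top 2 keywords
--         return "_".join(keywords[:2]) + "_issues"
-- ===== SOURCE B (Python) =====
-- from typing import Dict, List, Optional, Tuple
--
-- _THEMES = {
--     "usability": ["confusing", "hard", "difficult", "find", "navigate", "understand", "unclear", "complex"],
--     "performance": ["slow", "freeze", "lag", "timeout", "crash", "hang", "loading", "speed"],
--     "quality": ["bug", "error", "broken", "issue", "problem", "fail", "wrong", "defect"],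
--     "support": ["help", "support", "question", "unclear", "documentation", "guide", "manual"],
--     "pricing": ["price", "cost", "expensive", "cheap", "value", "pricing", "subscription"],
--     "features": ["feature", "functionality", "capability", "missing", "add", "request", "want"],
--     "onboarding": ["setup", "start", "onboarding", "getting", "started", "initial", "first"],
--     "integration": ["integrate", "api", "connect", "sync", "export", "import", "plugin"]
-- }
--
-- # inverted index: keyword -> themes it belongs to (a keyword like "unclear" maps to several)
-- _INDEX = {}
-- for _theme, _kws in _THEMES.items():
--     for _kw in _kws:
--         _INDEX.setdefault(_kw, []).append(_theme)
--
--
-- def _name_factor(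
--     keywords: List[str],
--     domain_hints: Optional[List[str]] = None
-- ) -> str:
--     if not keywords:
--         return "unknown_factor"
--
--     # single pass over the input keywords, accumulating per-theme hit counts
--     scores = {}
--     for kw in keywords:
--         for theme in _INDEX.get(kw, []):
--             scores[theme] = scores.get(theme, 0) + 1
--
--     # first theme (in _THEMES order) strictly beating the running best; best stays None if no theme scored
--     best, best_score = None, 0
--     for theme in _THEMES:
--         s = scores.get(theme, 0)
--         if s > best_score:
--             best, best_score = theme, s
--
--     if best is not None:
--         return best + "_issues"
--     return "_".join(keywords[:2]) + "_issues"
-- ===== Notes on version B (the rewrite author's own statement) =====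
-- stated objective: faster
-- what changed: Instead of rescanning the whole keyword list once per theme, B builds an inverted keyword->themes index once, tallies theme scores in a single dict pass over the input keywords, and picks the winner by a first-strict-improvement scan over the themes in their original order.
import Mathlib
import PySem

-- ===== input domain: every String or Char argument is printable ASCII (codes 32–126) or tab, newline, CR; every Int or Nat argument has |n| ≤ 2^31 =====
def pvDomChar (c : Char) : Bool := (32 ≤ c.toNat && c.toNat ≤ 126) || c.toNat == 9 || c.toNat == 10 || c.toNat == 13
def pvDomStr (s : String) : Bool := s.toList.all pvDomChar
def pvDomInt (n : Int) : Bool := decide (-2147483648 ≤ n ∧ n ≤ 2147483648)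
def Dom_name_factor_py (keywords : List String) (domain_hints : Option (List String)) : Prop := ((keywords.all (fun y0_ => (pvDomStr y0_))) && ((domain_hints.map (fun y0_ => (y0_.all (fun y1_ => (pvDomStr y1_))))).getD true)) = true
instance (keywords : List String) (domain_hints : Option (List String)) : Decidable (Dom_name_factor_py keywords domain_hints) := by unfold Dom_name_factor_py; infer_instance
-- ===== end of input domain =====

-- B replaces A's per-theme rescans of the keyword list by ONE inverted keyword->themes index and a single
-- pass over the input keywords (objective: faster; same result, first-max tie-break kept).
-- ===== PORT A =====
def pvThemes : List (String × List String) :=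
  [("usability", ["confusing", "hard", "difficult", "find", "navigate", "understand", "unclear", "complex"]),
   ("performance", ["slow", "freeze", "lag", "timeout", "crash", "hang", "loading", "speed"]),
   ("quality", ["bug", "error", "broken", "issue", "problem", "fail", "wrong", "defect"]),
   ("support", ["help", "support", "question", "unclear", "documentation", "guide", "manual"]),
   ("pricing", ["price", "cost", "expensive", "cheap", "value", "pricing", "subscription"]),
   ("features", ["feature", "functionality", "capability", "missing", "add", "request", "want"]),
   ("onboarding", ["setup", "start", "onboarding", "getting", "started", "initial", "first"]),
   ("integration", ["integrate", "api", "connect", "sync", "export", "import", "plugin"])]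

-- score of one theme: sum(1 for kw in keywords if kw in theme_keywords)
def nfScore (keywords : List String) (tks : List String) : Int :=
  ((keywords.filter (fun kw => tks.contains kw)).map (fun _ => (1 : Int))).sum

-- theme_scores: only themes with positive score, in theme order
def nfThemeScores (keywords : List String) : PySem.Dict String Int :=
  pvThemes.foldl (fun d p =>
    if 0 < nfScore keywords p.2 then d.insert p.1 (nfScore keywords p.2) else d) PySem.Dict.empty

def name_factor_py (keywords : List String) (domain_hints : Option (List String)) : String :=
  if keywords.isEmpty then "unknown_factor"
  else if (nfThemeScores keywords).items.isEmpty then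
    PySem.Str.join "_" (PySem.List.slice keywords none (some 2)) ++ "_issues"
  else
    ((PySem.List.max? (nfThemeScores keywords).keys
        (fun t => (nfThemeScores keywords).getD t 0)).getD "") ++ "_issues"

-- ===== PORT B =====
-- inverted index keyword -> themes, built once from the same theme table
def nfIndex : PySem.Dict String (List String) :=
  pvThemes.foldl (fun d p => p.2.foldl (fun d kw => d.insert kw (d.getD kw [] ++ [p.1])) d) PySem.Dict.empty

-- single pass over the input keywords, accumulating per-theme hit counts
def nfScores (keywords : List String) : PySem.Dict String Int :=
  keywords.foldl (fun s kw =>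
    (nfIndex.getD kw []).foldl (fun s t => s.insert t (s.getD t 0 + 1)) s) PySem.Dict.empty

-- first theme (in theme order) strictly beating the running best
def nfBest (keywords : List String) : Option String × Int :=
  pvThemes.foldl (fun b p =>
    if b.2 < (nfScores keywords).getD p.1 0 then (some p.1, (nfScores keywords).getD p.1 0) else b)
    (none, 0)

def name_factor_py_alt (keywords : List String) (domain_hints : Option (List String)) : String :=
  if keywords.isEmpty then "unknown_factor"
  else match (nfBest keywords).1 with
    | some t => t ++ "_issues"
    | none => PySem.Str.join "_" (PySem.List.slice keywords none (some 2)) ++ "_issues"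

-- ===== PRECONDITION & SPEC =====
def Spec_name_factor_py (keywords : List String) (domain_hints : Option (List String)) (out : String) : Prop := out = name_factor_py_alt keywords domain_hints
instance (keywords : List String) (domain_hints : Option (List String)) (out : String) : Decidable (Spec_name_factor_py keywords domain_hints out) := by unfold Spec_name_factor_py; infer_instance

-- ===== CLAIM (what is proved, stated in full; the proofs are below) =====
def Claim_equal_name_factor_py : Prop := ∀ (keywords : List String) (domain_hints : Option (List String)), Dom_name_factor_py keywords domain_hints → Spec_name_factor_py keywords domain_hints (name_factor_py keywords domain_hints)

-- ===== LEMMAS AND PROOFS =====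

-- the (theme, score) pair list both programs effectively work over
def psOf (keywords : List String) : List (String × Int) :=
  pvThemes.map (fun p => (p.1, nfScore keywords p.2))

-- the inner index-building fold appends theme `a` to the entry of each keyword of its (duplicate-free) list
lemma idx_inner (a : String) (l : List String) (hl : l.Nodup) (d : PySem.Dict String (List String)) (kw : String) :
    (l.foldl (fun d k => d.insert k (d.getD k [] ++ [a])) d).getD kw []
      = d.getD kw [] ++ (if l.contains kw then [a] else []) := by
  induction l generalizing d with
  | nil => simp
  | cons k0 rest ih =>
    obtain ⟨hk0, hrest⟩ := List.nodup_cons.mp hl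
    simp only [List.foldl_cons]
    rw [ih hrest, PySem.Dict.getD_insert]
    by_cases hk : kw = k0
    · subst hk
      simp [hk0]
    · simp [hk]

-- how many times theme `t` occurs in the index entry of `kw`
lemma idx_count (kw t : String) :
    (nfIndex.getD kw []).count t
      = pvThemes.countP (fun p => p.1 == t && p.2.contains kw) := by
  have main : ∀ (ts : List (String × List String)) (d : PySem.Dict String (List String)),
      (∀ p ∈ ts, p.2.Nodup) →
      ((ts.foldl (fun d p => p.2.foldl (fun d kw => d.insert kw (d.getD kw [] ++ [p.1])) d) d).getD kw []).count t
        = (d.getD kw []).count t + ts.countP (fun p => p.1 == t && p.2.contains kw) := by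
    intro ts
    induction ts with
    | nil => simp
    | cons p rest ih =>
      intro d hnd
      simp only [List.foldl_cons]
      rw [ih _ (fun q hq => hnd q (List.mem_cons_of_mem _ hq)),
          idx_inner p.1 p.2 (hnd p List.mem_cons_self) d kw,
          List.count_append, List.countP_cons]
      by_cases hc : kw ∈ p.2 <;> by_cases ht : p.1 = t <;>
        simp [hc, ht, List.count_nil] <;> omega
  have h := main pvThemes PySem.Dict.empty (by decide)
  have h0 : (PySem.Dict.empty : PySem.Dict String (List String)).getD kw [] = [] := rfl
  unfold nfIndex
  rw [h, h0, List.count_nil]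
  omega

-- B's accumulated score of theme t, in terms of the index entries of the processed keywords
lemma scores_getD (l : List String) (d : PySem.Dict String Int) (t : String) :
    (l.foldl (fun s kw => (nfIndex.getD kw []).foldl (fun s t => s.insert t (s.getD t 0 + 1)) s) d).getD t 0
      = d.getD t 0 + ((l.map (fun kw => ((nfIndex.getD kw []).count t : Int))).sum) := by
  induction l generalizing d with
  | nil => simp only [List.foldl_nil, List.map_nil, List.sum_nil, add_zero]
  | cons kw rest ih =>
    simp only [List.foldl_cons, List.map_cons, List.sum_cons]
    rw [ih, PySem.Dict.getD_foldl_insert_add_one]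
    ring

-- per-theme: B's score of t equals A's 0/1-sum over keywords, given the index-count characterisation
lemma scoreB_eq (t : String) (tks : List String) (keywords : List String)
    (hcnt : ∀ kw, (nfIndex.getD kw []).count t = if tks.contains kw then 1 else 0) :
    (nfScores keywords).getD t 0 = nfScore keywords tks := by
  unfold nfScores nfScore
  rw [scores_getD]
  have h0 : (PySem.Dict.empty : PySem.Dict String Int).getD t 0 = 0 := rfl
  rw [h0, zero_add]
  have hpt : ∀ kw ∈ keywords, ((nfIndex.getD kw []).count t : Int)
      = (fun kw => if tks.contains kw = true then (1 : Int) else 0) kw := by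
    intro kw _
    rw [hcnt kw]
    split <;> simp_all
  rw [List.map_congr_left hpt, PySem.List.sum_map_ite_one_zero,
      PySem.List.sum_map_const_int, List.countP_eq_length_filter]
  ring

lemma hcnt_usability : ∀ kw, (nfIndex.getD kw []).count "usability" = if (["confusing", "hard", "difficult", "find", "navigate", "understand", "unclear", "complex"] : List String).contains kw then 1 else 0 := by
  intro kw; rw [idx_count]
  simp only [pvThemes, List.countP_cons, List.countP_nil]
  by_cases h : kw ∈ (["confusing", "hard", "difficult", "find", "navigate", "understand", "unclear", "complex"] : List String) <;>
    simp_all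

lemma hcnt_performance : ∀ kw, (nfIndex.getD kw []).count "performance" = if (["slow", "freeze", "lag", "timeout", "crash", "hang", "loading", "speed"] : List String).contains kw then 1 else 0 := by
  intro kw; rw [idx_count]
  simp only [pvThemes, List.countP_cons, List.countP_nil]
  by_cases h : kw ∈ (["slow", "freeze", "lag", "timeout", "crash", "hang", "loading", "speed"] : List String) <;>
    simp_all

lemma hcnt_quality : ∀ kw, (nfIndex.getD kw []).count "quality" = if (["bug", "error", "broken", "issue", "problem", "fail", "wrong", "defect"] : List String).contains kw then 1 else 0 := by
  intro kw; rw [idx_count]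
  simp only [pvThemes, List.countP_cons, List.countP_nil]
  by_cases h : kw ∈ (["bug", "error", "broken", "issue", "problem", "fail", "wrong", "defect"] : List String) <;>
    simp_all

lemma hcnt_support : ∀ kw, (nfIndex.getD kw []).count "support" = if (["help", "support", "question", "unclear", "documentation", "guide", "manual"] : List String).contains kw then 1 else 0 := by
  intro kw; rw [idx_count]
  simp only [pvThemes, List.countP_cons, List.countP_nil]
  by_cases h : kw ∈ (["help", "support", "question", "unclear", "documentation", "guide", "manual"] : List String) <;>
    simp_all

lemma hcnt_pricing : ∀ kw, (nfIndex.getD kw []).count "pricing" = if (["price", "cost", "expensive", "cheap", "value", "pricing", "subscription"] : List String).contains kw then 1 else 0 := by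
  intro kw; rw [idx_count]
  simp only [pvThemes, List.countP_cons, List.countP_nil]
  by_cases h : kw ∈ (["price", "cost", "expensive", "cheap", "value", "pricing", "subscription"] : List String) <;>
    simp_all

lemma hcnt_features : ∀ kw, (nfIndex.getD kw []).count "features" = if (["feature", "functionality", "capability", "missing", "add", "request", "want"] : List String).contains kw then 1 else 0 := by
  intro kw; rw [idx_count]
  simp only [pvThemes, List.countP_cons, List.countP_nil]
  by_cases h : kw ∈ (["feature", "functionality", "capability", "missing", "add", "request", "want"] : List String) <;>
    simp_all

lemma hcnt_onboarding : ∀ kw, (nfIndex.getD kw []).count "onboarding" = if (["setup", "start", "onboarding", "getting", "started", "initial", "first"] : List String).contains kw then 1 else 0 := by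
  intro kw; rw [idx_count]
  simp only [pvThemes, List.countP_cons, List.countP_nil]
  by_cases h : kw ∈ (["setup", "start", "onboarding", "getting", "started", "initial", "first"] : List String) <;>
    simp_all

lemma hcnt_integration : ∀ kw, (nfIndex.getD kw []).count "integration" = if (["integrate", "api", "connect", "sync", "export", "import", "plugin"] : List String).contains kw then 1 else 0 := by
  intro kw; rw [idx_count]
  simp only [pvThemes, List.countP_cons, List.countP_nil]
  by_cases h : kw ∈ (["integrate", "api", "connect", "sync", "export", "import", "plugin"] : List String) <;>
    simp_all

-- B reads off exactly the scores A computes, theme by theme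
lemma map_scores_eq (keywords : List String) :
    pvThemes.map (fun p => (p.1, (nfScores keywords).getD p.1 0)) = psOf keywords := by
  unfold psOf
  apply List.map_congr_left
  intro p hp
  simp only [pvThemes, List.mem_cons, List.not_mem_nil, or_false] at hp
  rcases hp with rfl | rfl | rfl | rfl | rfl | rfl | rfl | rfl
  · rw [scoreB_eq _ _ keywords hcnt_usability]
  · rw [scoreB_eq _ _ keywords hcnt_performance]
  · rw [scoreB_eq _ _ keywords hcnt_quality]
  · rw [scoreB_eq _ _ keywords hcnt_support]
  · rw [scoreB_eq _ _ keywords hcnt_pricing]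
  · rw [scoreB_eq _ _ keywords hcnt_features]
  · rw [scoreB_eq _ _ keywords hcnt_onboarding]
  · rw [scoreB_eq _ _ keywords hcnt_integration]

-- first-max over a snoc
lemma max?_snoc {α κ : Type} [LT κ] [DecidableLT κ] (xs : List α) (x : α) (k : α → κ) :
    PySem.List.max? (xs ++ [x]) k
      = match PySem.List.max? xs k with
        | none => some x
        | some m => if k m < k x then some x else some m := by
  simp only [PySem.List.max?, List.foldl_append, List.foldl_cons, List.foldl_nil]
  rfl

-- first-max over the name column, with a key that reads off the score
lemma max?_map_fst (qs : List (String × Int)) (k : String → Int)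
    (hk : ∀ q ∈ qs, k q.1 = q.2) :
    PySem.List.max? (qs.map Prod.fst) k = Option.map Prod.fst (PySem.List.max? qs Prod.snd) := by
  induction qs using List.reverseRecOn with
  | nil => rfl
  | append_singleton qs q ih =>
    have hmap : (qs ++ [q]).map Prod.fst = qs.map Prod.fst ++ [q.1] := by simp
    rw [hmap, max?_snoc, max?_snoc, ih (fun q' hq' => hk q' (by simp [hq']))]
    cases hm : PySem.List.max? qs Prod.snd with
    | none => simp
    | some m =>
      have hmm : m ∈ qs := PySem.List.max?_mem hm
      have h1 : k q.1 = q.2 := hk q (by simp)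
      have h2 : k m.1 = m.2 := hk m (by simp [hmm])
      by_cases h : m.2 < q.2 <;> simp [h1, h2, h]

-- lookup in a dict with duplicate-free keys
lemma getD_mk_nodup (qs : List (String × Int)) (hnd : (qs.map Prod.fst).Nodup)
    (q : String × Int) (hq : q ∈ qs) :
    (PySem.Dict.mk qs).getD q.1 0 = q.2 := by
  induction qs with
  | nil => cases hq
  | cons p rest ih =>
    obtain ⟨k, v⟩ := p
    obtain ⟨hp, hrest⟩ := List.nodup_cons.mp hnd
    rcases List.mem_cons.mp hq with h | h
    · subst h
      simp [PySem.Dict.getD, PySem.Dict.get?_mk_cons]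
    · have hne : (k == q.1) = false := by
        have hmem : q.1 ∈ rest.map Prod.fst := List.mem_map_of_mem h
        simp only [beq_eq_false_iff_ne, ne_eq]
        intro hEq; subst hEq; exact hp hmem
      have := ih hrest h
      simpa [PySem.Dict.getD, PySem.Dict.get?_mk_cons, hne] using this

-- A's dict of positive scores is the filtered pair list, in order
lemma dfold_items (qs : List (String × Int)) : ∀ (d : PySem.Dict String Int),
    (∀ q ∈ qs, d.contains q.1 = false) → (qs.map Prod.fst).Nodup →
    (qs.foldl (fun d p => if 0 < p.2 then d.insert p.1 p.2 else d) d).items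
      = d.items ++ qs.filter (fun p => 0 < p.2) := by
  induction qs with
  | nil => simp
  | cons q rest ih =>
    intro d hfresh hnd
    obtain ⟨hq, hrest⟩ := List.nodup_cons.mp hnd
    simp only [List.foldl_cons, List.filter_cons]
    by_cases h : 0 < q.2
    · have hc : d.contains q.1 = false := hfresh q List.mem_cons_self
      have hins : (d.insert q.1 q.2).items = d.items ++ [(q.1, q.2)] := by
        simp [PySem.Dict.insert, hc]
      have hfresh' : ∀ q' ∈ rest, (d.insert q.1 q.2).contains q'.1 = false := by
        intro q' hq'
        have hne : (q.1 == q'.1) = false := by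
          have hmem : q'.1 ∈ rest.map Prod.fst := List.mem_map_of_mem hq'
          simp only [beq_eq_false_iff_ne, ne_eq]
          intro hEq; rw [hEq] at hq; exact hq hmem
        have hc' : d.contains q'.1 = false := hfresh q' (List.mem_cons_of_mem _ hq')
        simp only [PySem.Dict.contains] at hc' ⊢
        simp [hins, List.any_append, hc', hne]
      rw [if_pos h, ih _ hfresh' hrest, hins]
      simp [h]
    · rw [if_neg h, ih _ (fun q' hq' => hfresh q' (List.mem_cons_of_mem _ hq')) hrest]
      simp [h]

-- B's first-strict-improvement scan equals the first maximum of the positive pairs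
lemma scan_eq (qs : List (String × Int)) :
    qs.foldl (fun b p => if b.2 < p.2 then (some p.1, p.2) else b) ((none : Option String), (0 : Int))
      = (match PySem.List.max? (qs.filter (fun p => 0 < p.2)) Prod.snd with
         | none => ((none : Option String), (0 : Int))
         | some q => (some q.1, q.2)) := by
  induction qs using List.reverseRecOn with
  | nil => rfl
  | append_singleton qs q ih =>
    rw [List.foldl_append, List.foldl_cons, List.foldl_nil, ih, List.filter_append]
    by_cases hq : 0 < q.2
    · have hfq : [q].filter (fun p => 0 < p.2) = [q] := by simp [hq]
      rw [hfq, max?_snoc]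
      cases hm : PySem.List.max? (qs.filter (fun p => 0 < p.2)) Prod.snd with
      | none => simp [hq]
      | some m =>
        have hmpos : 0 < m.2 := by
          have h1 := PySem.List.max?_mem hm
          have h2 := List.of_mem_filter h1
          simpa using h2
        by_cases h2 : m.2 < q.2 <;> simp [h2]
    · have hfq : [q].filter (fun p => 0 < p.2) = [] := by simp [hq]
      rw [hfq, List.append_nil]
      cases hm : PySem.List.max? (qs.filter (fun p => 0 < p.2)) Prod.snd with
      | none => simp [hq]
      | some m =>
        have hmpos : 0 < m.2 := by
          have h1 := PySem.List.max?_mem hm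
          have h2 := List.of_mem_filter h1
          simpa using h2
        have hlt : ¬ m.2 < q.2 := by omega
        simp [hlt]

lemma names_psOf (keywords : List String) :
    (psOf keywords).map Prod.fst
      = ["usability", "performance", "quality", "support", "pricing", "features", "onboarding", "integration"] := by
  simp [psOf, pvThemes]

lemma nodup_psOf (keywords : List String) : ((psOf keywords).map Prod.fst).Nodup := by
  rw [names_psOf]; decide

-- A's theme_scores dict, as a literal dict over the filtered pair list
lemma themeScores_eq (keywords : List String) :
    nfThemeScores keywords = PySem.Dict.mk ((psOf keywords).filter (fun p => 0 < p.2)) := by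
  apply PySem.Dict.ext
  show (nfThemeScores keywords).items = (psOf keywords).filter (fun p => 0 < p.2)
  unfold nfThemeScores
  have hfold : pvThemes.foldl (fun d p =>
      if 0 < nfScore keywords p.2 then d.insert p.1 (nfScore keywords p.2) else d) PySem.Dict.empty
      = (psOf keywords).foldl (fun d p => if 0 < p.2 then d.insert p.1 p.2 else d) PySem.Dict.empty := by
    unfold psOf
    rw [List.foldl_map]
  rw [hfold, dfold_items (psOf keywords) PySem.Dict.empty (fun q _ => rfl) (nodup_psOf keywords)]
  rfl

-- B's scan, as the first maximum of the filtered pair list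
lemma best_eq (keywords : List String) :
    nfBest keywords
      = (match PySem.List.max? ((psOf keywords).filter (fun p => 0 < p.2)) Prod.snd with
         | none => ((none : Option String), (0 : Int))
         | some q => (some q.1, q.2)) := by
  unfold nfBest
  have hfold : pvThemes.foldl (fun b p =>
      if b.2 < (nfScores keywords).getD p.1 0 then (some p.1, (nfScores keywords).getD p.1 0) else b)
      ((none : Option String), (0 : Int))
      = (pvThemes.map (fun p => (p.1, (nfScores keywords).getD p.1 0))).foldl
          (fun b p => if b.2 < p.2 then (some p.1, p.2) else b) ((none : Option String), (0 : Int)) := by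
    rw [List.foldl_map]
  rw [hfold, map_scores_eq, scan_eq]

-- ===== VERDICT (by name: the statement is the Claim_ definition above) =====
theorem name_factor_py_spec : Claim_equal_name_factor_py := by
  intro keywords domain_hints _
  unfold Spec_name_factor_py name_factor_py name_factor_py_alt
  by_cases hkw : keywords.isEmpty = true
  · rw [if_pos hkw, if_pos hkw]
  · rw [if_neg hkw, if_neg hkw, themeScores_eq, best_eq]
    have hkq : ∀ q ∈ (psOf keywords).filter (fun p => 0 < p.2),
        (PySem.Dict.mk ((psOf keywords).filter (fun p => 0 < p.2))).getD q.1 0 = q.2 := by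
      intro q hq
      exact getD_mk_nodup _ ((nodup_psOf keywords).sublist (((psOf keywords).filter_sublist).map Prod.fst)) q hq
    have hkeys : (PySem.Dict.mk ((psOf keywords).filter (fun p => 0 < p.2))).keys
        = ((psOf keywords).filter (fun p => 0 < p.2)).map Prod.fst := rfl
    rw [hkeys, max?_map_fst _ _ hkq]
    cases hm : PySem.List.max? ((psOf keywords).filter (fun p => 0 < p.2)) Prod.snd with
    | none =>
      have hnil : (psOf keywords).filter (fun p => 0 < p.2) = [] :=
        (PySem.List.max?_eq_none_iff _ _).mp hm
      rw [hnil]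
      rfl
    | some q =>
      have hne : ((psOf keywords).filter (fun p => 0 < p.2)) ≠ [] := by
        intro h
        rw [h] at hm
        simp [PySem.List.max?] at hm
      have hie : ((PySem.Dict.mk ((psOf keywords).filter (fun p => 0 < p.2))).items.isEmpty) = false := by
        simpa [List.isEmpty_iff] using hne
      rw [hie]
      rfl
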